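-- pv_equiv track=rewrite | github.com/jslomkowski/aml | poc/old/pipeline (2).py | _wh_list
-- ===== SOURCE A (Python) =====
-- def _wh_list(cfg):
--
--     wh_list = []
--     for j in cfg:
--         d = {}
--         for i in j.items():
--             t_class = '_'.join(i[0].split("_")[0:2])
--             d.setdefault(t_class)
--             fd = {k: v for k, v in j.items() if t_class in k}
--             df = {}
--             for i in fd.items():
--                 try:
--                     param_name = i[0].split("_")[2:]
--                     if len(param_name) > 1:
--                         param_name = ['_'.join(param_name)]
--                     df.setdefault(param_name[0], i[1])
--                 except IndexError:
--                     param_name = i[0].split("_")[2:3]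
--             d[t_class] = df
--         wh_list.append(d)
--     return wh_list
-- ===== SOURCE B (Python) =====
-- def _wh_list(cfg):
--     # Different decomposition: per dict, (1) collect the distinct class prefixes
--     # in first-occurrence order, then (2) ONE distribution pass over the entries,
--     # appending each entry's (suffix-name, value) to every matching class's
--     # sub-dict, instead of A's per-key re-filtering and sub-dict rebuilding.
--     out = []
--     for j in cfg:
--         classes = []
--         for key in j:
--             tc = '_'.join(key.split('_')[:2])
--             if tc not in classes:
--                 classes.append(tc)
--         groups = {tc: {} for tc in classes}
--         for k, v in j.items():
--             parts = k.split('_')[2:]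
--             if not parts:
--                 continue
--             name = '_'.join(parts)
--             for tc in classes:
--                 if tc in k:
--                     groups[tc].setdefault(name, v)
--         out.append(groups)
--     return out
-- ===== Notes on version B (the rewrite author's own statement) =====
-- stated objective: faster
-- what changed: B restructures the work per dict into two stages — collect the distinct class prefixes in first-occurrence order, then one distribution pass over the entries that appends each entry's (suffix-name, value) to every matching class's sub-dict — instead of A's per-key re-filtering of the dict and full rebuild of that class's sub-dict.
import Mathlib
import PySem

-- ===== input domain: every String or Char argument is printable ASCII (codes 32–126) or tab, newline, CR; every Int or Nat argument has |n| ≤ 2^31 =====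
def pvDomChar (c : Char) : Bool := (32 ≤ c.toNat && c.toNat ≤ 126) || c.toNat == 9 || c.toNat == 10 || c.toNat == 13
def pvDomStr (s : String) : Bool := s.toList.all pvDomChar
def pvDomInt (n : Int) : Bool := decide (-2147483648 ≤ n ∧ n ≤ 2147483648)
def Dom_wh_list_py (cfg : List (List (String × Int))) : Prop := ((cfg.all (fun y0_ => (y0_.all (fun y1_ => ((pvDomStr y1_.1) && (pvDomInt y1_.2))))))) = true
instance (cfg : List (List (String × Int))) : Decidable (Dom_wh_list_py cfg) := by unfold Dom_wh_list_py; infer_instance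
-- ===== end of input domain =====

-- B replaces A's per-key re-filtering and sub-dict rebuilding by two stages per dict: collect the
-- distinct class prefixes, then ONE distribution pass over the entries appending each entry to every
-- matching class's sub-dict (objective: faster — it avoids the redundant per-key rebuilds).

-- shared helpers (both sources contain these exact expressions):
-- s.split("_") — the separator is the non-empty literal "_", so Python never raises; the getD [] branch is dead
def pvSplit (s : String) : List String := (PySem.Str.split? s "_").getD []
-- '_'.join(k.split("_")[0:2])  and  k.split("_")[2:]
def pvCls (k : String) : String := PySem.Str.join "_" (PySem.List.slice (pvSplit k) (some 0) (some 2))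
def pvSfx (k : String) : List String := PySem.List.slice (pvSplit k) (some 2) none

-- ===== PORT A =====
-- 'd.setdefault(t_class); … ; d[t_class] = df' is ported as one 'insert': the None placeholder is
-- immediately overwritten (never read) and is untypeable here; insert appends at the end for a new
-- key and overwrites in place for an existing one — exactly setdefault-then-assign.
def wh_list_py (cfg : List (List (String × Int))) : List (List (String × List (String × Int))) :=
  cfg.foldl (fun wh j =>
    let d : PySem.Dict String (List (String × Int)) :=
      j.foldl (fun d i =>
        let t_class := pvCls i.1
        let fd := j.filter (fun kv => PySem.Str.isIn t_class kv.1)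
        let df : PySem.Dict String Int :=
          fd.foldl (fun df i2 =>
            -- try/except IndexError: param_name = i[0].split("_")[2:]; empty ⇒ param_name[0] raises ⇒ skip
            match pvSfx i2.1 with
            | [] => df
            | [p] => df.setdefault p i2.2
            | ps => df.setdefault (PySem.Str.join "_" ps) i2.2) PySem.Dict.empty
        d.insert t_class df.items) PySem.Dict.empty
    wh ++ [d.items]) []

-- ===== PORT B =====

def wh_list_py_alt (cfg : List (List (String × Int))) : List (List (String × List (String × Int))) :=
  cfg.foldl (fun out j =>
    -- stage 1: distinct class prefixes in first-occurrence order
    let classes : List String :=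
      j.foldl (fun cs kv => if cs.contains (pvCls kv.1) then cs else cs ++ [pvCls kv.1]) []
    -- groups = {tc: {} for tc in classes}
    let init : PySem.Dict String (PySem.Dict String Int) :=
      classes.foldl (fun g tc => g.insert tc PySem.Dict.empty) PySem.Dict.empty
    -- stage 2: one distribution pass over the entries
    -- 'groups[tc].setdefault(name, v)' mutates the looked-up sub-dict: ported as 'modify' (tc is
    -- always a present key, so the Dict.empty default of 'modify' is dead)
    let groups : PySem.Dict String (PySem.Dict String Int) :=
      j.foldl (fun g kv =>
        if (pvSfx kv.1).isEmpty then g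
        else
          let name := PySem.Str.join "_" (pvSfx kv.1)
          classes.foldl (fun g tc =>
            if PySem.Str.isIn tc kv.1 then g.modify tc PySem.Dict.empty (fun df => df.setdefault name kv.2)
            else g) g) init
    out ++ [groups.items.map (fun p => (p.1, p.2.items))]) []

-- ===== PRECONDITION & SPEC =====
def Spec_wh_list_py (cfg : List (List (String × Int))) (out : List (List (String × List (String × Int)))) : Prop := out = wh_list_py_alt cfg
instance (cfg : List (List (String × Int))) (out : List (List (String × List (String × Int)))) : Decidable (Spec_wh_list_py cfg out) := by unfold Spec_wh_list_py; infer_instance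

-- ===== CLAIM (what is proved, stated in full; the proofs are below) =====
def Claim_equal_wh_list_py : Prop := ∀ (cfg : List (List (String × Int))), Dom_wh_list_py cfg → Spec_wh_list_py cfg (wh_list_py cfg)

-- ===== LEMMAS AND PROOFS =====

theorem pv_map_fst {α β : Type} (f : α → β) (cs : List α) :
    (cs.map (fun tc => (tc, f tc))).map Prod.fst = cs := by
  induction cs with
  | nil => rfl
  | cons a t ih => simp only [List.map_cons, ih]

-- B's per-class view of the distribution pass: what each class's sub-dict receives
def pvSub (tc : String) (j : List (String × Int)) : PySem.Dict String Int :=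
  j.foldl (fun df kv =>
    if (pvSfx kv.1).isEmpty then df
    else if PySem.Str.isIn tc kv.1 then df.setdefault (PySem.Str.join "_" (pvSfx kv.1)) kv.2
    else df) PySem.Dict.empty

theorem pv_join_single (p : String) : PySem.Str.join "_" [p] = p := by
  simp [PySem.Str.join, PySem.Chars.join, List.intercalate]

-- A's per-key sub-dict (fold over the filtered list) is exactly what B's distribution gives tc
theorem pv_df_eq (tc : String) (j : List (String × Int)) :
    (j.filter (fun kv => PySem.Str.isIn tc kv.1)).foldl (fun df i2 =>
      match pvSfx i2.1 with
      | [] => df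
      | [p] => df.setdefault p i2.2
      | ps => df.setdefault (PySem.Str.join "_" ps) i2.2) PySem.Dict.empty
    = pvSub tc j := by
  unfold pvSub
  rw [List.foldl_filter]
  congr 1
  funext df kv
  show (if PySem.Str.isIn tc kv.1 then _ else df) = _
  rcases hs : pvSfx kv.1 with _ | ⟨p, rest2⟩
  · simp [hs]
  · rcases rest2 with _ | ⟨q, r⟩
    · simp [hs, pv_join_single]
    · simp [hs]

-- Folding 'insert k (g k)' equals folding the guarded 'insert only if absent', provided every key
-- already stored carries its g-value (the value A overwrites with is the value already there).
theorem pv_fold_insert_guard {ν : Type} (f : (String × Int) → String) (g : String → ν) :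
    ∀ (js : List (String × Int)) (d : PySem.Dict String ν),
      (∀ k v, (k, v) ∈ d.items → v = g k) →
      js.foldl (fun d kv => d.insert (f kv) (g (f kv))) d
        = js.foldl (fun d kv => if d.contains (f kv) then d else d.insert (f kv) (g (f kv))) d := by
  intro js
  induction js with
  | nil => intro d _; rfl
  | cons kv rest ih =>
    intro d hinv
    simp only [List.foldl_cons]
    by_cases hc : d.contains (f kv) = true
    · have heq : d.insert (f kv) (g (f kv)) = d := by
        apply PySem.Dict.ext
        rw [PySem.Dict.items_insert_of_contains d _ hc]
        conv_rhs => rw [← List.map_id d.items]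
        apply List.map_congr_left
        intro p hp
        by_cases hk : p.1 == f kv
        · have h1 : p.1 = f kv := by simpa using hk
          have h2 : p.2 = g p.1 := hinv p.1 p.2 (by simpa using hp)
          simp only [← h1, BEq.rfl, if_true, id]
          exact Prod.ext rfl h2.symm
        · simp [hk]
      rw [if_pos hc, heq]
      exact ih d hinv
    · rw [if_neg hc]
      apply ih
      intro k v hv
      rw [PySem.Dict.items_insert_of_not_contains d _ (by simpa using hc)] at hv
      rcases List.mem_append.mp hv with h | h
      · exact hinv k v h
      · simp at h; rw [h.1, h.2]

-- the dedup fold keeps the class list duplicate-free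
theorem pv_classes_nodup : ∀ (js : List (String × Int)) (cs : List String), cs.Nodup →
    (js.foldl (fun cs kv => if cs.contains (pvCls kv.1) then cs else cs ++ [pvCls kv.1]) cs).Nodup := by
  intro js
  induction js with
  | nil => intro cs h; exact h
  | cons kv rest ih =>
    intro cs h
    simp only [List.foldl_cons]
    by_cases hc : cs.contains (pvCls kv.1) = true
    · rw [if_pos hc]; exact ih cs h
    · rw [if_neg hc]
      have hm : pvCls kv.1 ∉ cs := by simpa using hc
      exact ih _ (h.append (List.nodup_singleton _) (List.disjoint_singleton.mpr hm))

-- the guarded insert fold, read off as a list: one item per class, in dedup order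
theorem pv_guarded_items {ν : Type} (f : String → ν) :
    ∀ (js : List (String × Int)) (cs : List String) (d : PySem.Dict String ν),
      cs.Nodup → d.items = cs.map (fun tc => (tc, f tc)) →
      (js.foldl (fun d kv => if d.contains (pvCls kv.1) then d
                             else d.insert (pvCls kv.1) (f (pvCls kv.1))) d).items
        = (js.foldl (fun cs kv => if cs.contains (pvCls kv.1) then cs else cs ++ [pvCls kv.1]) cs).map
            (fun tc => (tc, f tc)) := by
  intro js
  induction js with
  | nil => intro cs d _ h; simpa using h
  | cons kv rest ih =>
    intro cs d hnd hit
    have hkeys : d.keys = cs := by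
      simp only [PySem.Dict.keys, hit]; exact pv_map_fst _ _
    have hcont : d.contains (pvCls kv.1) = cs.contains (pvCls kv.1) := by
      by_cases hm : pvCls kv.1 ∈ cs
      · rw [(PySem.Dict.contains_iff_mem_keys d _).mpr (hkeys ▸ hm)]
        simp [hm]
      · have : ¬ d.contains (pvCls kv.1) = true := fun h =>
          hm (hkeys ▸ (PySem.Dict.contains_iff_mem_keys d _).mp h)
        simp only [Bool.not_eq_true] at this
        rw [this]; symm; simpa using hm
    simp only [List.foldl_cons, hcont]
    by_cases hc : cs.contains (pvCls kv.1) = true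
    · rw [if_pos hc, if_pos hc]; exact ih cs d hnd hit
    · rw [if_neg hc, if_neg hc]
      apply ih (cs ++ [pvCls kv.1])
      · have hm : pvCls kv.1 ∉ cs := by simpa using hc
        exact hnd.append (List.nodup_singleton _) (List.disjoint_singleton.mpr hm)
      · rw [PySem.Dict.items_insert_of_not_contains d _ (by rw [hcont]; simpa using hc), hit]
        simp

-- one distribution step (the inner fold over the class list), seen through keys and lookups
theorem pv_inner_step (cond : String → Bool) (h : PySem.Dict String Int → PySem.Dict String Int) :
    ∀ (ds : List String) (g : PySem.Dict String (PySem.Dict String Int)) (F : String → PySem.Dict String Int)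
      (cs : List String), ds.Nodup → (∀ tc ∈ ds, tc ∈ cs) → g.keys = cs → cs.Nodup →
      (∀ tc ∈ cs, g.getD tc PySem.Dict.empty = F tc) →
      ((ds.foldl (fun g tc => if cond tc then g.modify tc PySem.Dict.empty h else g) g).keys = cs ∧
       ∀ tc ∈ cs, (ds.foldl (fun g tc => if cond tc then g.modify tc PySem.Dict.empty h else g) g).getD tc PySem.Dict.empty
         = if tc ∈ ds ∧ cond tc = true then h (F tc) else F tc) := by
  intro ds
  induction ds with
  | nil =>
    intro g F cs _ _ hk _ hg
    refine ⟨hk, fun tc htc => ?_⟩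
    simp only [List.foldl_nil]
    simp [hg tc htc]
  | cons tc0 rest ih =>
    intro g F cs hnd hsub hk hcsnd hg
    simp only [List.foldl_cons]
    have htc0 : tc0 ∈ cs := hsub tc0 (by simp)
    have hnotin : tc0 ∉ rest := (List.nodup_cons.mp hnd).1
    by_cases hcond : cond tc0 = true
    · rw [if_pos hcond]
      have hcont : g.contains tc0 = true := (PySem.Dict.contains_iff_mem_keys g tc0).mpr (hk ▸ htc0)
      have hk' : (g.modify tc0 PySem.Dict.empty h).keys = cs := by
        rw [PySem.Dict.keys_modify, PySem.Dict.keys_insert_of_contains g _ hcont, hk]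
      have hg' : ∀ tc ∈ cs, (g.modify tc0 PySem.Dict.empty h).getD tc PySem.Dict.empty
          = (fun tc => if tc = tc0 ∧ cond tc = true then h (F tc) else F tc) tc := by
        intro tc htc
        show (g.modify tc0 PySem.Dict.empty h).getD tc PySem.Dict.empty
          = if tc = tc0 ∧ cond tc = true then h (F tc) else F tc
        rw [PySem.Dict.getD_modify]
        by_cases he : tc = tc0
        · subst he
          rw [if_pos rfl, hg tc htc, if_pos ⟨rfl, hcond⟩]
        · rw [if_neg he, hg tc htc, if_neg (fun hx => he hx.1)]
      obtain ⟨hka, hgb⟩ := ih (g.modify tc0 PySem.Dict.empty h)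
        (fun tc => if tc = tc0 ∧ cond tc = true then h (F tc) else F tc) cs hnd.of_cons
        (fun tc htc => hsub tc (by simp [htc])) hk' hcsnd hg'
      refine ⟨hka, fun tc htc => ?_⟩
      rw [hgb tc htc]
      by_cases he : tc = tc0
      · subst he; simp [hnotin, hcond]
      · simp [he, List.mem_cons]
    · rw [if_neg hcond]
      obtain ⟨hka, hgb⟩ := ih g F cs hnd.of_cons (fun tc htc => hsub tc (by simp [htc])) hk hcsnd hg
      refine ⟨hka, fun tc htc => ?_⟩
      rw [hgb tc htc]
      by_cases he : tc = tc0
      · subst he; simp [hnotin, hcond]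
      · simp [he, List.mem_cons]

-- the whole distribution pass: each class's slot ends up holding pvSub's fold
theorem pv_outer (cs : List String) (hnd : cs.Nodup) :
    ∀ (js : List (String × Int)) (g : PySem.Dict String (PySem.Dict String Int))
      (F : String → PySem.Dict String Int),
      g.keys = cs → (∀ tc ∈ cs, g.getD tc PySem.Dict.empty = F tc) →
      ((js.foldl (fun g kv =>
          if (pvSfx kv.1).isEmpty then g
          else cs.foldl (fun g tc =>
            if PySem.Str.isIn tc kv.1 then
              g.modify tc PySem.Dict.empty (fun df => df.setdefault (PySem.Str.join "_" (pvSfx kv.1)) kv.2)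
            else g) g) g).keys = cs ∧
       ∀ tc ∈ cs, (js.foldl (fun g kv =>
          if (pvSfx kv.1).isEmpty then g
          else cs.foldl (fun g tc =>
            if PySem.Str.isIn tc kv.1 then
              g.modify tc PySem.Dict.empty (fun df => df.setdefault (PySem.Str.join "_" (pvSfx kv.1)) kv.2)
            else g) g) g).getD tc PySem.Dict.empty
         = js.foldl (fun df kv =>
             if (pvSfx kv.1).isEmpty then df
             else if PySem.Str.isIn tc kv.1 then df.setdefault (PySem.Str.join "_" (pvSfx kv.1)) kv.2
             else df) (F tc)) := by
  intro js
  induction js with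
  | nil =>
    intro g F hk hg
    refine ⟨hk, fun tc htc => ?_⟩
    simp only [List.foldl_nil]
    exact hg tc htc
  | cons kv rest ih =>
    intro g F hk hg
    simp only [List.foldl_cons]
    by_cases hemp : (pvSfx kv.1).isEmpty = true
    · rw [if_pos hemp]
      obtain ⟨hka, hgb⟩ := ih g F hk hg
      refine ⟨hka, fun tc htc => ?_⟩
      rw [hgb tc htc]
      conv_rhs => rw [if_pos hemp]
    · rw [if_neg hemp]
      obtain ⟨hk', hg'⟩ := pv_inner_step (fun tc => PySem.Str.isIn tc kv.1)
        (fun df => df.setdefault (PySem.Str.join "_" (pvSfx kv.1)) kv.2) cs g F cs hnd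
        (fun tc htc => htc) hk hnd hg
      obtain ⟨hka, hgb⟩ := ih _ _ hk' hg'
      refine ⟨hka, fun tc htc => ?_⟩
      rw [hgb tc htc]
      conv_rhs => rw [if_neg hemp]
      by_cases hin : PySem.Str.isIn tc kv.1 = true
      · rw [if_pos ⟨htc, hin⟩, if_pos hin]
      · rw [if_neg (fun hx => hin hx.2), if_neg hin]

-- the A-side loop, after pv_df_eq: one item per class, holding pvSub
theorem pv_A_items (j : List (String × Int)) :
    (j.foldl (fun d i => d.insert (pvCls i.1) ((pvSub (pvCls i.1) j).items))
      (PySem.Dict.empty : PySem.Dict String (List (String × Int)))).items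
      = (j.foldl (fun cs kv => if cs.contains (pvCls kv.1) then cs else cs ++ [pvCls kv.1]) []).map
          (fun tc => (tc, (pvSub tc j).items)) := by
  rw [pv_fold_insert_guard (fun kv => pvCls kv.1) (fun tc => (pvSub tc j).items) j
    PySem.Dict.empty (by intro k v hv; simp [PySem.Dict.empty] at hv)]
  exact pv_guarded_items (fun tc => (pvSub tc j).items) j [] PySem.Dict.empty List.nodup_nil
    (by simp [PySem.Dict.empty])

-- the B-side result, read off as a list: one item per class, holding pvSub
theorem pv_B_items (j : List (String × Int)) :
    ((j.foldl (fun g kv =>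
        if (pvSfx kv.1).isEmpty then g
        else (j.foldl (fun cs kv => if cs.contains (pvCls kv.1) then cs else cs ++ [pvCls kv.1]) []).foldl
          (fun g tc =>
            if PySem.Str.isIn tc kv.1 then
              g.modify tc PySem.Dict.empty (fun df => df.setdefault (PySem.Str.join "_" (pvSfx kv.1)) kv.2)
            else g) g)
      ((j.foldl (fun cs kv => if cs.contains (pvCls kv.1) then cs else cs ++ [pvCls kv.1]) []).foldl
        (fun g tc => g.insert tc PySem.Dict.empty) PySem.Dict.empty)).items.map
          (fun p => (p.1, p.2.items)))
      = (j.foldl (fun cs kv => if cs.contains (pvCls kv.1) then cs else cs ++ [pvCls kv.1]) []).map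
          (fun tc => (tc, (pvSub tc j).items)) := by
  set classes : List String :=
    j.foldl (fun cs kv => if cs.contains (pvCls kv.1) then cs else cs ++ [pvCls kv.1]) [] with hclasses
  have hnd : classes.Nodup := pv_classes_nodup j [] List.nodup_nil
  have hinit : (classes.foldl (fun g tc => g.insert tc PySem.Dict.empty)
      (PySem.Dict.empty : PySem.Dict String (PySem.Dict String Int))).items
      = classes.map (fun tc => (tc, PySem.Dict.empty)) := by
    have := PySem.Dict.items_foldl_insert_fresh classes (fun tc => tc)
      (fun _ => (PySem.Dict.empty : PySem.Dict String Int))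
      (PySem.Dict.empty : PySem.Dict String (PySem.Dict String Int))
      (by intro a _; simp [PySem.Dict.empty, PySem.Dict.contains]) (by simpa using hnd)
    simpa [PySem.Dict.empty] using this
  have hinitk : (classes.foldl (fun g tc => g.insert tc PySem.Dict.empty)
      (PySem.Dict.empty : PySem.Dict String (PySem.Dict String Int))).keys = classes := by
    simp only [PySem.Dict.keys, hinit]; exact pv_map_fst _ _
  have hinitg : ∀ tc ∈ classes, (classes.foldl (fun g tc => g.insert tc PySem.Dict.empty)
      (PySem.Dict.empty : PySem.Dict String (PySem.Dict String Int))).getD tc PySem.Dict.empty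
      = PySem.Dict.empty := by
    intro tc htc
    have hmem : (tc, (PySem.Dict.empty : PySem.Dict String Int))
        ∈ (classes.foldl (fun g tc => g.insert tc PySem.Dict.empty)
            (PySem.Dict.empty : PySem.Dict String (PySem.Dict String Int))).items := by
      rw [hinit]
      exact List.mem_map_of_mem htc
    exact PySem.Dict.getD_of_mem_items _ hmem (by rw [hinitk]; exact hnd) PySem.Dict.empty
  obtain ⟨hk, hg⟩ := pv_outer classes hnd j
    (classes.foldl (fun g tc => g.insert tc PySem.Dict.empty) PySem.Dict.empty)
    (fun _ => PySem.Dict.empty) hinitk hinitg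
  rw [PySem.Dict.items_eq_map_keys
    (j.foldl (fun g kv =>
        if (pvSfx kv.1).isEmpty then g
        else classes.foldl (fun g tc =>
          if PySem.Str.isIn tc kv.1 then
            g.modify tc PySem.Dict.empty (fun df => df.setdefault (PySem.Str.join "_" (pvSfx kv.1)) kv.2)
          else g) g)
      (classes.foldl (fun g tc => g.insert tc PySem.Dict.empty) PySem.Dict.empty))
    (by rw [hk]; exact hnd) PySem.Dict.empty, hk, List.map_map]
  apply List.map_congr_left
  intro tc htc
  simp only [Function.comp_apply]
  rw [hg tc htc]
  rfl

-- ===== VERDICT (by name: the statement is the Claim_ definition above) =====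
set_option maxHeartbeats 1000000 in
theorem wh_list_py_spec : Claim_equal_wh_list_py := by
  intro cfg _
  unfold Spec_wh_list_py wh_list_py wh_list_py_alt
  rw [PySem.List.foldl_append_singleton_eq_map, PySem.List.foldl_append_singleton_eq_map]
  simp only [List.nil_append]
  apply List.map_congr_left
  intro j _
  simp only [pv_df_eq]
  rw [pv_A_items j]
  exact (pv_B_items j).symm
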